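-- pv_equiv track=rewrite | github.com/konstantinaaa/Workearly | Exercise5.py | BasicAssignmentExercise5
-- ===== SOURCE A (Python) =====
-- def BasicAssignmentExercise5(strParam):
--     # Initialize variables to keep track of numbers and the final count
--     current_number = ""
--     count = 0
--
--     for char in strParam:
--         # Check if the character is a digit
--         if char.isdigit():
--             current_number += char  # Add the digit to the current number and if the character is not a digit, it means we have reached the end of a number
--         elif len(current_number) != 0:  # counts the numbers and reset the counter number
--             count += 1
--             current_number = ""  # Reset current_number
--
--     # Check if there's a remaining number at the end of the string
--     if len(current_number) != 0:
--         count += 1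
--
--     return count
-- ===== SOURCE B (Python) =====
-- def BasicAssignmentExercise5(strParam):
--     # Stage 1: mask every non-digit character to a space.
--     masked = "".join(c if c.isdigit() else " " for c in strParam)
--     # Stage 2: whitespace-split the masked string; each word is one digit run.
--     return len(masked.split())
-- ===== Notes on version B (the rewrite author's own statement) =====
-- stated objective: idiomatic
-- what changed: Replaces A's single-pass run accumulator with end-of-string flush by two staged passes: mask every non-digit to a space, then count the words of the masked string with str.split().
import Mathlib
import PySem

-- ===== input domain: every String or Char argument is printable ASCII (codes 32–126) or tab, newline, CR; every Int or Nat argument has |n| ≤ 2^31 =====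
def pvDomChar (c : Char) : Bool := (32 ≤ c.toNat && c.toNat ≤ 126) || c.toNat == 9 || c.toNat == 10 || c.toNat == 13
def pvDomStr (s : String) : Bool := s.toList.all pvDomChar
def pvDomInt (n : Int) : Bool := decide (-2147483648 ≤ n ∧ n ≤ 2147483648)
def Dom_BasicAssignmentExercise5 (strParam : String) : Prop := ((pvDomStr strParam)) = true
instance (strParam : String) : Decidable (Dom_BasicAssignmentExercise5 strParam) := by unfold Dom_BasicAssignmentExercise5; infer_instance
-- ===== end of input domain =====

-- B replaces A's single-pass run accumulator by two staged passes (mask non-digits to spaces, then count the words of str.split()); objective: idiomatic, same O(n) cost.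

-- ===== PORT A =====
-- state: (current_number as chars, count); flush after the loop, as in A
def pvAStep (st : List Char × Int) (c : Char) : List Char × Int :=
  if PySem.Chars.isdigit c then (st.1 ++ [c], st.2)
  else if st.1.length ≠ 0 then ([], st.2 + 1)
  else st

def BasicAssignmentExercise5 (strParam : String) : Int :=
  let st := strParam.toList.foldl pvAStep ([], 0)
  if st.1.length ≠ 0 then st.2 + 1 else st.2

-- ===== PORT B =====
-- stage 1 of Source B: "".join(c if c.isdigit() else " " for c in strParam)
def pvMask (c : Char) : Char := if PySem.Chars.isdigit c then c else ' '

-- stage 2 of Source B: len(masked.split())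
def BasicAssignmentExercise5_alt (strParam : String) : Int :=
  let masked : String := String.ofList (strParam.toList.map pvMask)
  ((PySem.Str.split₀ masked).length : Int)

-- ===== PRECONDITION & SPEC =====
def Spec_BasicAssignmentExercise5 (strParam : String) (out : Int) : Prop := out = BasicAssignmentExercise5_alt strParam
instance (strParam : String) (out : Int) : Decidable (Spec_BasicAssignmentExercise5 strParam out) := by unfold Spec_BasicAssignmentExercise5; infer_instance

-- ===== CLAIM (what is proved, stated in full; the proofs are below) =====
def Claim_equal_BasicAssignmentExercise5 : Prop := ∀ (strParam : String), Dom_BasicAssignmentExercise5 strParam → Spec_BasicAssignmentExercise5 strParam (BasicAssignmentExercise5 strParam)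

-- ===== LEMMAS AND PROOFS =====

-- number of digit runs in the remainder, counting the run in progress (inW)
def pvN : List Char → Bool → Nat
  | [], inW => if inW then 1 else 0
  | c :: cs, inW =>
      if PySem.Chars.isdigit c then pvN cs true
      else (if inW then 1 else 0) + pvN cs false

theorem pvIsspaceOfDigit (c : Char) (h : PySem.Chars.isdigit c = true) :
    PySem.Chars.isspace c = false := by
  simp [PySem.Chars.isdigit, Char.le_def, UInt32.le_iff_toNat_le] at h
  simp only [PySem.Chars.isspace]
  simp only [Bool.or_eq_false_iff, Bool.and_eq_false_iff, decide_eq_false_iff_not]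
  omega

theorem pvMaskSpace (c : Char) :
    PySem.Chars.isspace (pvMask c) = !PySem.Chars.isdigit c := by
  by_cases h : PySem.Chars.isdigit c = true
  · simp [pvMask, h, pvIsspaceOfDigit c h]
  · simp at h
    simp [pvMask, h]
    decide

theorem pvGoLen (l : List Char) : ∀ (cur : List Char) (acc : List (List Char)),
    (PySem.Chars.split₀.go (l.map pvMask) cur acc).length
      = acc.length + pvN l (!cur.isEmpty) := by
  induction l with
  | nil =>
    intro cur acc
    cases cur <;> simp [PySem.Chars.split₀.go, pvN]
  | cons c cs ih =>
    intro cur acc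
    by_cases hd : PySem.Chars.isdigit c = true
    · have hs : PySem.Chars.isspace (pvMask c) = false := by
        rw [pvMaskSpace, hd]; rfl
      simp only [List.map_cons, PySem.Chars.split₀.go, hs, Bool.false_eq_true, if_false]
      rw [ih]
      simp [pvN, hd]
    · have hs : PySem.Chars.isspace (pvMask c) = true := by
        rw [pvMaskSpace]; simp [hd]
      cases cur with
      | nil =>
        simp only [List.map_cons, PySem.Chars.split₀.go, hs, if_true, List.isEmpty_nil]
        rw [ih]
        simp [pvN, hd]
      | cons x xs =>
        simp only [List.map_cons, PySem.Chars.split₀.go, hs, if_true, List.isEmpty_cons,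
          Bool.false_eq_true, if_false]
        rw [ih]
        simp [pvN, hd]
        omega

theorem pvALoop (cs : List Char) : ∀ (cur : List Char) (cnt : Int),
    (if ((cs.foldl pvAStep (cur, cnt)).1).length ≠ 0
       then (cs.foldl pvAStep (cur, cnt)).2 + 1
       else (cs.foldl pvAStep (cur, cnt)).2)
    = cnt + (pvN cs (!cur.isEmpty) : Int) := by
  induction cs with
  | nil =>
    intro cur cnt
    cases cur <;> simp [pvN]
  | cons c cs ih =>
    intro cur cnt
    by_cases hd : PySem.Chars.isdigit c = true
    · have h1 : pvAStep (cur, cnt) c = (cur ++ [c], cnt) := by simp [pvAStep, hd]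
      rw [List.foldl_cons, h1, ih]
      cases cur <;> simp [pvN, hd]
    · cases cur with
      | nil =>
        have h1 : pvAStep ([], cnt) c = ([], cnt) := by simp [pvAStep, hd]
        rw [List.foldl_cons, h1, ih]
        simp [pvN, hd]
      | cons x xs =>
        have h1 : pvAStep (x :: xs, cnt) c = ([], cnt + 1) := by simp [pvAStep, hd]
        rw [List.foldl_cons, h1, ih]
        simp [pvN, hd]
        ring

-- ===== VERDICT (by name: the statement is the Claim_ definition above) =====
theorem BasicAssignmentExercise5_spec : Claim_equal_BasicAssignmentExercise5 := by
  intro s _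
  show _ = _
  simp only [BasicAssignmentExercise5, BasicAssignmentExercise5_alt]
  rw [pvALoop]
  have : (PySem.Str.split₀ (String.ofList (s.toList.map pvMask))).length
      = (PySem.Chars.split₀ (s.toList.map pvMask)).length := by
    simp [PySem.Str.split₀]
  rw [this]
  show _ = ((PySem.Chars.split₀.go (s.toList.map pvMask) [] []).length : Int)
  rw [pvGoLen]
  simp
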